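-- pv_equiv track=rewrite | github.com/leezhongjun/2048Solver | web.py | free_squares
-- ===== SOURCE A (Python) =====
-- def free_squares(grid):
-- 	score = 0
-- 	for row in grid:
-- 		if (2 in row or 4 in row or 8 in row) and 0 in row:
-- 			score += 1
-- 	inv_grid = list(zip(*grid))
-- 	inv_grid = [list(x) for x in inv_grid]
-- 	for row in inv_grid:
-- 		if (2 in row or 4 in row or 8 in row) and 0 in row:
-- 			score += 1
-- 	return score
-- ===== SOURCE B (Python) =====
-- def free_squares(grid):
-- 	score = 0
-- 	col = None  # per-column (has-small-tile, has-zero) flags, merging truncates like zip(*grid)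
-- 	for row in grid:
-- 		small = any(v == 2 or v == 4 or v == 8 for v in row)
-- 		zero = any(v == 0 for v in row)
-- 		if small and zero:
-- 			score += 1
-- 		rflags = [(v == 2 or v == 4 or v == 8, v == 0) for v in row]
-- 		if col is None:
-- 			col = rflags
-- 		else:
-- 			col = [(s1 or s2, z1 or z2) for (s1, z1), (s2, z2) in zip(col, rflags)]
-- 	if col:
-- 		score += sum(1 for s, z in col if s and z)
-- 	return score
-- ===== Notes on version B (the rewrite author's own statement) =====
-- stated objective: alternative
-- what changed: One pass over the rows maintaining per-column (has-small-tile, has-zero) boolean flag pairs merged with truncating zip, instead of building the transposed grid and re-scanning it.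
import Mathlib
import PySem

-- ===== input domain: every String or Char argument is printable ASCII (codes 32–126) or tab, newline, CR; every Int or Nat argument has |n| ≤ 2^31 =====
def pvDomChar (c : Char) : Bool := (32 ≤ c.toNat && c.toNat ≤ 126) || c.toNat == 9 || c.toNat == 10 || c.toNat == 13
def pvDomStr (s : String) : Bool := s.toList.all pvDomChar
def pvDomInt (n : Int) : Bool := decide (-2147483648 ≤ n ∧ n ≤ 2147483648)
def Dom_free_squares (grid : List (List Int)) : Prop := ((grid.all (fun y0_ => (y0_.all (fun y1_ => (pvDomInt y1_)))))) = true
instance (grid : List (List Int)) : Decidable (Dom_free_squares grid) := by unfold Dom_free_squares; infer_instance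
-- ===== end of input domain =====

-- B replaces A's transpose-and-rescan by a single pass that merges per-column flag pairs (alternative decomposition, same cost).

-- ===== PORT A =====
-- hand port of Python's zip(*grid) (no PySem primitive): columns truncated to the shortest row; exact
def pyZipStar (g : List (List Int)) : List (List Int) :=
  match g with
  | [] => []
  | [r] => r.map (fun v => [v])
  | r :: rs => List.zipWith (fun v c => v :: c) r (pyZipStar rs)

def free_squares (grid : List (List Int)) : Int :=
  let score : Int := grid.foldl (fun s row =>
    if ((2 : Int) ∈ row ∨ (4 : Int) ∈ row ∨ (8 : Int) ∈ row) ∧ (0 : Int) ∈ row then s + 1 else s) 0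
  let inv_grid := pyZipStar grid
  inv_grid.foldl (fun s row =>
    if ((2 : Int) ∈ row ∨ (4 : Int) ∈ row ∨ (8 : Int) ∈ row) ∧ (0 : Int) ∈ row then s + 1 else s) score

-- ===== PORT B =====
def fsFlags (row : List Int) : List (Bool × Bool) :=
  row.map (fun v => (v == 2 || v == 4 || v == 8, v == 0))

def fsMerge (a b : List (Bool × Bool)) : List (Bool × Bool) :=
  List.zipWith (fun p q => (p.1 || q.1, p.2 || q.2)) a b

def fsStep (st : Int × Option (List (Bool × Bool))) (row : List Int) :
    Int × Option (List (Bool × Bool)) :=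
  let small := row.any (fun v => v == 2 || v == 4 || v == 8)
  let zero := row.any (fun v => v == 0)
  let s := if small && zero then st.1 + 1 else st.1
  match st.2 with
  | none => (s, some (fsFlags row))
  | some c => (s, some (fsMerge c (fsFlags row)))

def free_squares_alt (grid : List (List Int)) : Int :=
  let st := grid.foldl fsStep (0, none)
  match st.2 with
  | none => st.1
  | some c => st.1 + c.foldl (fun s p => if p.1 && p.2 then s + 1 else s) 0

-- ===== PRECONDITION & SPEC =====
def Spec_free_squares (grid : List (List Int)) (out : Int) : Prop := out = free_squares_alt grid
instance (grid : List (List Int)) (out : Int) : Decidable (Spec_free_squares grid out) := by unfold Spec_free_squares; infer_instance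

-- ===== CLAIM (what is proved, stated in full; the proofs are below) =====
def Claim_equal_free_squares : Prop := ∀ (grid : List (List Int)), Dom_free_squares grid → Spec_free_squares grid (free_squares grid)

-- ===== LEMMAS AND PROOFS =====

-- the per-row / per-column boolean predicate
def fsPred (row : List Int) : Bool :=
  row.any (fun v => v == 2 || v == 4 || v == 8) && row.any (fun v => v == 0)

-- column flag pair of a column
def colFlag (c : List Int) : Bool × Bool :=
  (c.any (fun v => v == 2 || v == 4 || v == 8), c.any (fun v => v == 0))

lemma mem_any (a : Int) (row : List Int) :
    (a ∈ row) ↔ row.any (fun v => v == a) = true := by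
  simp only [List.any_eq_true, beq_iff_eq]
  exact ⟨fun h => ⟨a, h, rfl⟩, fun ⟨x, hx, he⟩ => he ▸ hx⟩

lemma any_or_split (row : List Int) :
    row.any (fun v => v == 2 || v == 4 || v == 8)
      = (row.any (fun v => v == 2) || row.any (fun v => v == 4) || row.any (fun v => v == 8)) := by
  induction row with
  | nil => rfl
  | cons a t ih =>
    simp only [List.any_cons, ih]
    cases a == 2 <;> cases a == 4 <;> cases a == 8 <;> simp

lemma pred_decide (row : List Int) :
    (if ((2 : Int) ∈ row ∨ (4 : Int) ∈ row ∨ (8 : Int) ∈ row) ∧ (0 : Int) ∈ row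
      then (1 : Int) else 0) = (if fsPred row then 1 else 0) := by
  have key : (((2 : Int) ∈ row ∨ (4 : Int) ∈ row ∨ (8 : Int) ∈ row) ∧ (0 : Int) ∈ row)
      ↔ fsPred row = true := by
    unfold fsPred
    rw [any_or_split]
    simp only [Bool.and_eq_true, Bool.or_eq_true, mem_any, or_assoc]
  split_ifs with hA hB hB
  · rfl
  · exact absurd (key.mp hA) hB
  · exact absurd (key.mpr hB) hA
  · rfl

-- shifting the accumulator out of a counting fold
lemma foldl_count_shift (l : List (List Int)) (s : Int)
    (f : List Int → Bool) :
    l.foldl (fun s row => if f row then s + 1 else s) s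
    = s + l.foldl (fun s row => if f row then s + 1 else s) 0 := by
  induction l generalizing s with
  | nil => simp
  | cons r t ih =>
    simp only [List.foldl_cons]
    rw [ih, ih (if f r then 0 + 1 else 0)]
    split_ifs <;> omega

-- the A-side fold counts fsPred
lemma foldl_count (l : List (List Int)) (s : Int) :
    l.foldl (fun s row =>
      if ((2 : Int) ∈ row ∨ (4 : Int) ∈ row ∨ (8 : Int) ∈ row) ∧ (0 : Int) ∈ row then s + 1 else s) s
    = s + l.foldl (fun s row => if fsPred row then s + 1 else s) 0 := by
  induction l generalizing s with
  | nil => simp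
  | cons r t ih =>
    simp only [List.foldl_cons]
    rw [ih]
    rw [foldl_count_shift t (if fsPred r then 0 + 1 else 0) (fun row => fsPred row)]
    have hrow := pred_decide r
    split_ifs at hrow ⊢ <;> omega

-- merging flags commutes with consing a row onto the columns
lemma map_colFlag_zipWith (r : List Int) (t : List (List Int)) :
    (List.zipWith (fun v c => v :: c) r t).map colFlag
      = fsMerge (fsFlags r) (t.map colFlag) := by
  induction r generalizing t with
  | nil => simp [fsMerge, fsFlags]
  | cons a r ih =>
    cases t with
    | nil => simp [fsMerge, fsFlags]
    | cons c t =>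
      simp only [List.zipWith_cons_cons, List.map_cons, fsFlags, fsMerge] at *
      simp [ih, colFlag, List.any_cons]

lemma map_colFlag_single (r : List Int) :
    (r.map (fun v => [v])).map colFlag = fsFlags r := by
  simp [fsFlags, colFlag, List.map_map, Function.comp]

-- colFlags of the transpose, cons rule
lemma colFlags_cons (r : List Int) (rs : List (List Int)) (h : rs ≠ []) :
    (pyZipStar (r :: rs)).map colFlag
      = fsMerge (fsFlags r) ((pyZipStar rs).map colFlag) := by
  cases rs with
  | nil => exact absurd rfl h
  | cons r' rs' =>
    show (List.zipWith (fun v c => v :: c) r (pyZipStar (r' :: rs'))).map colFlag = _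
    exact map_colFlag_zipWith r _

lemma fsMerge_assoc (a b c : List (Bool × Bool)) :
    fsMerge (fsMerge a b) c = fsMerge a (fsMerge b c) := by
  induction a generalizing b c with
  | nil => simp [fsMerge]
  | cons p a ih =>
    cases b with
    | nil => simp [fsMerge]
    | cons q b =>
      cases c with
      | nil => simp [fsMerge]
      | cons w c =>
        have h := ih b c
        simp only [fsMerge, List.zipWith_cons_cons] at h ⊢
        simp [h, Bool.or_assoc]

-- left fold with fsMerge over the remaining rows
lemma foldl_merge (rs : List (List Int)) (c : List (Bool × Bool)) (hrs : rs ≠ []) :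
    rs.foldl (fun acc r => fsMerge acc (fsFlags r)) c
      = fsMerge c ((pyZipStar rs).map colFlag) := by
  induction rs generalizing c with
  | nil => exact absurd rfl hrs
  | cons r rs ih =>
    cases rs with
    | nil => simp only [List.foldl_cons, List.foldl_nil, pyZipStar, map_colFlag_single]
    | cons r' rs' =>
      rw [List.foldl_cons, ih _ (by simp), colFlags_cons r _ (by simp), fsMerge_assoc]

-- the B fold with accumulator some c
lemma foldl_fsStep_some (rs : List (List Int)) (s : Int) (c : List (Bool × Bool)) :
    rs.foldl fsStep (s, some c)
      = (s + rs.foldl (fun s row => if fsPred row then s + 1 else s) 0,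
         some (rs.foldl (fun acc r => fsMerge acc (fsFlags r)) c)) := by
  induction rs generalizing s c with
  | nil => simp
  | cons r rs ih =>
    simp only [List.foldl_cons, fsStep]
    rw [ih]
    have h := foldl_count_shift rs (if fsPred r then 0 + 1 else 0)
      (fun row => fsPred row)
    rw [Prod.mk.injEq]
    refine ⟨?_, rfl⟩
    show (if fsPred r then s + 1 else s) + _ = s + _
    rw [h]
    split_ifs <;> omega

-- counting over the flag list equals counting the predicate over the columns
lemma count_flags (t : List (List Int)) (s : Int) :
    (t.map colFlag).foldl (fun s p => if p.1 && p.2 then s + 1 else s) s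
      = t.foldl (fun s row => if fsPred row then s + 1 else s) s := by
  rw [List.foldl_map]
  rfl

-- unfolding pyZipStar on a singleton list
lemma pyZipStar_single (r : List Int) : pyZipStar [r] = r.map (fun v => [v]) := rfl

-- ===== VERDICT (by name: the statement is the Claim_ definition above) =====
theorem free_squares_spec : Claim_equal_free_squares := by
  intro grid _
  unfold Spec_free_squares free_squares free_squares_alt
  cases grid with
  | nil => rfl
  | cons r rs =>
    simp only [List.foldl_cons]
    have hstep : fsStep (0, none) r
        = (if fsPred r then (0 : Int) + 1 else 0, some (fsFlags r)) := rfl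
    rw [hstep, foldl_fsStep_some]
    have hmerged : (rs.foldl (fun acc row => fsMerge acc (fsFlags row)) (fsFlags r))
        = (pyZipStar (r :: rs)).map colFlag := by
      cases rs with
      | nil => simp only [List.foldl_nil, pyZipStar_single, map_colFlag_single]
      | cons r' rs' =>
        rw [foldl_merge _ _ (by simp), colFlags_cons r _ (by simp)]
    simp only [hmerged]
    rw [count_flags]
    rw [foldl_count (pyZipStar (r :: rs)), foldl_count rs]
    have hrow := pred_decide r
    split_ifs at hrow ⊢ <;> omega
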